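-- pv_equiv track=rewrite | github.com/msanders/bio | bio/mass.py | subpeptides
-- ===== SOURCE A (Python) =====
-- def subpeptides(peptide, cycle=None):
--     if cycle is None:
--         cycle = True
--     subpeptides = []
--     for length in range(1, len(peptide)):
--         for i in range(len(peptide)):
--             subpeptide = peptide[i:][:length]
--             if len(subpeptide) < length:
--                 if not cycle:
--                     continue
--                 subpeptide += peptide[:length - len(subpeptide)]
--             subpeptides.append(subpeptide)
--     return subpeptides
-- ===== SOURCE B (Python) =====
-- def subpeptides(peptide, cycle=None):
--     n = len(peptide)
--     do_cycle = cycle is None or cycle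
--     # Stage 1: one prefix-row per start index i — the prefixes (lengths 1..)
--     # of the rotation starting at i (cyclic) or of the suffix peptide[i:] (linear).
--     rows = []
--     for i in range(n):
--         base = peptide[i:] + peptide[:i] if do_cycle else peptide[i:]
--         rows.append([base[:length] for length in range(1, min(len(base) + 1, n))])
--     # Stage 2: ragged transpose — column k collects every row's k-th prefix,
--     # which yields the length-major, start-index-minor order.
--     out = []
--     for k in range(n - 1):
--         for row in rows:
--             if k < len(row):
--                 out.append(row[k])
--     return out
-- ===== Notes on version B (the rewrite author's own statement) =====
-- stated objective: alternative
-- what changed: Two staged passes over a different intermediate data structure: first build, per start index, the list of prefixes of its rotation (cyclic) or suffix (linear), then recover A's length-major order by a ragged transpose of that prefix matrix; no per-slice length check or wrap concatenation remains.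
import Mathlib
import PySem

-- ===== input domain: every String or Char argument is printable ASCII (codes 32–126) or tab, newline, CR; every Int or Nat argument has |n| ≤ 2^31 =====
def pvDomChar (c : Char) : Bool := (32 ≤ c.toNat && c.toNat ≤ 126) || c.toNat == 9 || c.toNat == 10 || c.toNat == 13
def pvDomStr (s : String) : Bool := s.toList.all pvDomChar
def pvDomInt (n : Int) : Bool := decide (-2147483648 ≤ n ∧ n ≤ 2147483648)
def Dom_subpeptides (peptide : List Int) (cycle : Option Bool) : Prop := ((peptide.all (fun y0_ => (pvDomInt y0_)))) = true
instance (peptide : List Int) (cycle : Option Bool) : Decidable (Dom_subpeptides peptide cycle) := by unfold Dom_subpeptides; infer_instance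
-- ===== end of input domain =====

-- B builds a per-start-index matrix of rotation/suffix prefixes and ragged-transposes it,
-- instead of A's nested slice-check-and-wrap loops: an alternative two-stage decomposition.

-- ===== PORT A =====
def subpeptides (peptide : List Int) (cycle : Option Bool) : List (List Int) :=
  -- if cycle is None: cycle = True
  let c : Bool := cycle.getD true
  (PySem.List.pyRange 1 (PySem.List.len peptide) 1).foldl (fun acc length =>
    (PySem.List.pyRange 0 (PySem.List.len peptide) 1).foldl (fun acc i =>
      let subpeptide := PySem.List.slice (PySem.List.slice peptide (some i) none) none (some length)
      if PySem.List.len subpeptide < length then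
        if !c then acc   -- continue
        else acc ++ [subpeptide ++ PySem.List.slice peptide none (some (length - PySem.List.len subpeptide))]
      else acc ++ [subpeptide]) acc) []

-- ===== PORT B =====
def subpeptides_alt (peptide : List Int) (cycle : Option Bool) : List (List Int) :=
  let n := PySem.List.len peptide
  let doCycle : Bool := cycle.getD true   -- cycle is None or cycle
  -- Stage 1: one prefix-row per start index
  let rows := (PySem.List.pyRange 0 n 1).map (fun i =>
    let base := if doCycle
      then PySem.List.slice peptide (some i) none ++ PySem.List.slice peptide none (some i)
      else PySem.List.slice peptide (some i) none
    (PySem.List.pyRange 1 (min (PySem.List.len base + 1) n) 1).map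
      (fun length => PySem.List.slice base none (some length)))
  -- Stage 2: ragged transpose (row[k] is in range whenever the guard holds, so getD is exact)
  (PySem.List.pyRange 0 (n - 1) 1).foldl (fun acc k =>
    rows.foldl (fun acc row =>
      if k < PySem.List.len row then acc ++ [(PySem.List.pyGet? row k).getD []] else acc) acc) []

-- ===== PRECONDITION & SPEC =====
def Spec_subpeptides (peptide : List Int) (cycle : Option Bool) (out : List (List Int)) : Prop := out = subpeptides_alt peptide cycle
instance (peptide : List Int) (cycle : Option Bool) (out : List (List Int)) : Decidable (Spec_subpeptides peptide cycle out) := by unfold Spec_subpeptides; infer_instance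

-- ===== CLAIM (what is proved, stated in full; the proofs are below) =====
def Claim_equal_subpeptides : Prop := ∀ (peptide : List Int) (cycle : Option Bool), Dom_subpeptides peptide cycle → Spec_subpeptides peptide cycle (subpeptides peptide cycle)

-- ===== LEMMAS AND PROOFS =====

-- glue: a foldl whose body appends a block is a flatMap (congruent form of
-- PySem.List.foldl_append_eq_flatMap, for a body not syntactically of that shape)
theorem pv_foldl_eq_flatMap {α β : Type} (f : List β → α → List β) (g : α → List β)
    (h : ∀ acc x, f acc x = acc ++ g x) :
    ∀ (l : List α) (acc : List β), l.foldl f acc = acc ++ l.flatMap g := by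
  intro l
  induction l with
  | nil => simp
  | cons x xs ih => intro acc; simp [List.foldl_cons, h, ih]

-- the per-index block A's inner loop appends
def pvBlockA (c : Bool) (peptide : List Int) (length i : Int) : List (List Int) :=
  let subpeptide := PySem.List.slice (PySem.List.slice peptide (some i) none) none (some length)
  if PySem.List.len subpeptide < length then
    if !c then []
    else [subpeptide ++ PySem.List.slice peptide none (some (length - PySem.List.len subpeptide))]
  else [subpeptide]

theorem pv_A_flat (peptide : List Int) (cycle : Option Bool) :
    subpeptides peptide cycle =
      (PySem.List.pyRange 1 (PySem.List.len peptide) 1).flatMap fun length =>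
        (PySem.List.pyRange 0 (PySem.List.len peptide) 1).flatMap
          (pvBlockA (cycle.getD true) peptide length) := by
  unfold subpeptides
  rw [pv_foldl_eq_flatMap _ (fun length =>
        (PySem.List.pyRange 0 (PySem.List.len peptide) 1).flatMap
          (pvBlockA (cycle.getD true) peptide length))]
  · simp
  · intro acc length
    rw [pv_foldl_eq_flatMap _ (pvBlockA (cycle.getD true) peptide length)]
    intro acc i
    simp only [pvBlockA]
    split_ifs <;> simp

-- pointwise, cyclic case: A's wrap-around block is a prefix of the rotation at i
theorem pv_point_cyc (xs : List Int) (L i : Int)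
    (hL1 : 1 ≤ L) (hLn : L < (xs.length : Int)) (hi0 : 0 ≤ i) (hin : i < (xs.length : Int)) :
    pvBlockA true xs L i = [(xs.drop i.toNat ++ xs.take i.toNat).take L.toNat] := by
  simp only [pvBlockA, Bool.not_true, if_neg (by decide : ¬ (false = true))]
  rw [PySem.List.slice_from _ hi0, PySem.List.slice_to _ (by omega)]
  by_cases h : L.toNat ≤ xs.length - i.toNat
  · have hsublen : ((xs.drop i.toNat).take L.toNat).length = L.toNat := by simp; omega
    rw [if_neg (by simp only [PySem.List.len_eq, hsublen]; omega)]
    rw [List.take_append_of_le_length (by simp; omega)]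
  · have hsublen : ((xs.drop i.toNat).take L.toNat).length = xs.length - i.toNat := by
      simp; omega
    rw [if_pos (by simp only [PySem.List.len_eq, hsublen]; omega)]
    have hlen2 : PySem.List.len ((xs.drop i.toNat).take L.toNat)
        = ((xs.length - i.toNat : Nat) : Int) := by
      simp only [PySem.List.len_eq, hsublen]
    rw [hlen2, PySem.List.slice_to _ (by omega)]
    have htake : (xs.drop i.toNat).take L.toNat = xs.drop i.toNat :=
      List.take_of_length_le (by simp; omega)
    rw [htake, List.take_append, htake, List.length_drop, List.take_take]
    congr 2
    congr 1
    omega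

-- pointwise, linear case: A's skip is B's row-length condition
theorem pv_point_lin (xs : List Int) (L i : Int)
    (hL1 : 1 ≤ L) (hLn : L < (xs.length : Int)) (hi0 : 0 ≤ i) (hin : i < (xs.length : Int)) :
    pvBlockA false xs L i =
      if i + L ≤ (xs.length : Int) then [(xs.drop i.toNat).take L.toNat] else [] := by
  simp only [pvBlockA, Bool.not_false]
  rw [PySem.List.slice_from _ hi0, PySem.List.slice_to _ (by omega)]
  have hsublen : ((xs.drop i.toNat).take L.toNat).length = min L.toNat (xs.length - i.toNat) := by
    simp
  by_cases h : i + L ≤ (xs.length : Int)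
  · rw [if_pos h, if_neg (by simp only [PySem.List.len_eq, hsublen]; omega)]
  · rw [if_neg h, if_pos (by simp only [PySem.List.len_eq, hsublen]; omega)]
    simp


-- the row of B's prefix matrix at start index i, and the block B's transpose emits at (k, i)
def pvRow (c : Bool) (xs : List Int) (i : Int) : List (List Int) :=
  let base := if c then PySem.List.slice xs (some i) none ++ PySem.List.slice xs none (some i)
              else PySem.List.slice xs (some i) none
  (PySem.List.pyRange 1 (min (PySem.List.len base + 1) (PySem.List.len xs)) 1).map
    (fun length => PySem.List.slice base none (some length))

def pvRowBlock (c : Bool) (xs : List Int) (k i : Int) : List (List Int) :=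
  if k < PySem.List.len (pvRow c xs i) then [(PySem.List.pyGet? (pvRow c xs i) k).getD []] else []

theorem pv_B_flat (peptide : List Int) (cycle : Option Bool) :
    subpeptides_alt peptide cycle =
      (PySem.List.pyRange 0 (PySem.List.len peptide - 1) 1).flatMap fun k =>
        (PySem.List.pyRange 0 (PySem.List.len peptide) 1).flatMap
          (fun i => pvRowBlock (cycle.getD true) peptide k i) := by
  unfold subpeptides_alt
  rw [pv_foldl_eq_flatMap _ (fun k =>
        ((PySem.List.pyRange 0 (PySem.List.len peptide) 1).map
            (pvRow (cycle.getD true) peptide)).flatMap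
          (fun row => if k < PySem.List.len row then [(PySem.List.pyGet? row k).getD []] else []))]
  · simp only [List.nil_append]
    refine List.flatMap_congr fun k _ => ?_
    rw [List.flatMap_map]
    rfl
  · intro acc k
    rw [pv_foldl_eq_flatMap _
        (fun row => if k < PySem.List.len row then [(PySem.List.pyGet? row k).getD []] else [])]
    · rfl
    · intro acc row
      split_ifs <;> simp

-- B's (k, i) block is A's block at length 1 + k, cyclic case
theorem pv_row_cyc (xs : List Int) (k i : Int)
    (hk0 : 0 ≤ k) (hk : k < (xs.length : Int) - 1) (hi0 : 0 ≤ i) (hin : i < (xs.length : Int)) :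
    pvRowBlock true xs k i = pvBlockA true xs (1 + k) i := by
  rw [pv_point_cyc xs (1 + k) i (by omega) (by omega) hi0 hin]
  unfold pvRowBlock pvRow
  simp only [if_true]
  rw [PySem.List.slice_from _ hi0, PySem.List.slice_to _ hi0]
  have hbl : (xs.drop i.toNat ++ xs.take i.toNat).length = xs.length := by simp; omega
  have hmin : min (PySem.List.len (xs.drop i.toNat ++ xs.take i.toNat) + 1) (PySem.List.len xs)
      = (xs.length : Int) := by
    simp only [PySem.List.len_eq, hbl]; omega
  rw [hmin]
  rw [if_pos (by
    simp only [PySem.List.len_eq, List.length_map, PySem.List.length_pyRange_one]; omega)]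
  have hkn : k = ((k.toNat : Nat) : Int) := by omega
  rw [hkn, PySem.List.pyGet?_natCast, List.getElem?_map, PySem.List.getElem?_pyRange_one,
      if_pos (by omega : k.toNat < ((xs.length : Int) - 1).toNat)]
  simp only [Option.map_some, Option.getD_some]
  rw [PySem.List.slice_to _ (by omega)]

-- B's (k, i) block is A's block at length 1 + k, linear case
theorem pv_row_lin (xs : List Int) (k i : Int)
    (hk0 : 0 ≤ k) (hk : k < (xs.length : Int) - 1) (hi0 : 0 ≤ i) (hin : i < (xs.length : Int)) :
    pvRowBlock false xs k i = pvBlockA false xs (1 + k) i := by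
  rw [pv_point_lin xs (1 + k) i (by omega) (by omega) hi0 hin]
  unfold pvRowBlock pvRow
  simp only [Bool.false_eq_true, if_false]
  rw [PySem.List.slice_from _ hi0]
  by_cases hc : i + (1 + k) ≤ (xs.length : Int)
  · rw [if_pos hc, if_pos (by
      simp only [PySem.List.len_eq, List.length_map, PySem.List.length_pyRange_one,
        List.length_drop]; omega)]
    have hkn : k = ((k.toNat : Nat) : Int) := by omega
    rw [hkn, PySem.List.pyGet?_natCast, List.getElem?_map, PySem.List.getElem?_pyRange_one,
      if_pos (by simp only [PySem.List.len_eq, List.length_drop]; omega)]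
    simp only [Option.map_some, Option.getD_some]
    rw [PySem.List.slice_to _ (by omega)]
  · rw [if_neg hc, if_neg (by
      simp only [PySem.List.len_eq, List.length_map, PySem.List.length_pyRange_one,
        List.length_drop]; omega)]

-- ===== VERDICT (by name: the statement is the Claim_ definition above) =====
theorem subpeptides_spec : Claim_equal_subpeptides := by
  intro peptide cycle _
  unfold Spec_subpeptides
  rw [pv_A_flat, pv_B_flat]
  rw [PySem.List.pyRange_one 1 (PySem.List.len peptide),
      PySem.List.pyRange_one 0 (PySem.List.len peptide - 1)]
  simp only [sub_zero, zero_add]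
  rw [List.flatMap_map, List.flatMap_map]
  refine List.flatMap_congr fun k hk => ?_
  rw [List.mem_range] at hk
  refine List.flatMap_congr fun i hi => ?_
  rw [PySem.List.mem_pyRange_one] at hi
  simp only [PySem.List.len_eq] at hk hi
  have hk' : (k : Int) < (peptide.length : Int) - 1 := by omega
  cases hcy : cycle.getD true
  · exact (pv_row_lin peptide k i (by omega) hk' hi.1 hi.2).symm
  · exact (pv_row_cyc peptide k i (by omega) hk' hi.1 hi.2).symm
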